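-- pv_equiv track=rewrite | github.com/PauloBernardo90/Drake-X | drake_x/dex/multidex.py | cross_reference_classes
-- ===== SOURCE A (Python) =====
-- from collections import Counter, defaultdict
--
-- def cross_reference_classes(
--     class_lists: dict[str, list[str]],
-- ) -> dict[str, list[str]]:
--     """Build a map of package → DEX files containing classes from that package.
--
--     Useful for detecting package fragmentation across DEX files.
--     """
--     pkg_to_dex: dict[str, set[str]] = defaultdict(set)
--     for dex_name, classes in class_lists.items():
--         for cls in classes:
--             pkg = _extract_package(cls)
--             if pkg:
--                 pkg_to_dex[pkg].add(dex_name)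
--
--     return {pkg: sorted(dexes) for pkg, dexes in pkg_to_dex.items()}
--
-- def _extract_package(class_name: str) -> str:
--     """Extract package from a fully-qualified class name."""
--     # Handle both dot and slash notation
--     normalized = class_name.replace("/", ".").lstrip("L").rstrip(";")
--     parts = normalized.rsplit(".", 1)
--     return parts[0] if len(parts) > 1 else ""
-- ===== SOURCE B (Python) =====
-- def cross_reference_classes(
--     class_lists: dict[str, list[str]],
-- ) -> dict[str, list[str]]:
--     """Build a map of package -> DEX files containing classes from that package.
--
--     Flatten to (package, dex) pairs first, then group per first-seen package.
--     """
--     pairs = [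
--         (pkg, dex_name)
--         for dex_name, classes in class_lists.items()
--         for cls in classes
--         if (pkg := _extract_package(cls))
--     ]
--     return {
--         pkg: sorted({d for p, d in pairs if p == pkg})
--         for pkg in dict.fromkeys(p for p, _ in pairs)
--     }
--
-- def _extract_package(class_name: str) -> str:
--     """Extract package from a fully-qualified class name."""
--     normalized = class_name.replace("/", ".").lstrip("L").rstrip(";")
--     parts = normalized.rsplit(".", 1)
--     return parts[0] if len(parts) > 1 else ""
-- ===== Notes on version B (the rewrite author's own statement) =====
-- stated objective: alternative
-- what changed: B flattens the input to a single (package, dex) pair list, dedups the packages in first-occurrence order with dict.fromkeys, and builds each entry by a per-package scan over the pair list, instead of A's single pass accumulating a defaultdict of sets.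
import Mathlib
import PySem

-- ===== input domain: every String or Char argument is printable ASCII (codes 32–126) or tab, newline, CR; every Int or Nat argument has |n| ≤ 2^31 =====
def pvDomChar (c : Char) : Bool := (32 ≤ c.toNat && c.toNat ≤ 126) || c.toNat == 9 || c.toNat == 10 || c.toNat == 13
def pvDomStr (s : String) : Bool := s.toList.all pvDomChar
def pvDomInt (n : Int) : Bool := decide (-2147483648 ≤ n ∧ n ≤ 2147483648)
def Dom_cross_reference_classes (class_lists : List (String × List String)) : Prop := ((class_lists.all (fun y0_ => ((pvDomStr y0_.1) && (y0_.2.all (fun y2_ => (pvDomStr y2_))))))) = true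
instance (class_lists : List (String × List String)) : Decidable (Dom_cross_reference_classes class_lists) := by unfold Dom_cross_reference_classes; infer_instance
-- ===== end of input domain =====

-- B changes the decomposition (flatten to (package, dex) pairs, dedup packages, per-package scan)
-- while returning exactly A's dict; same cost class, objective: alternative structure.

-- shared helper: port of _extract_package (used verbatim by both Pythons).
-- lstrip("L") / rstrip(";") / rsplit(".", 1) are ported by hand over List Char
-- (dropWhile from the left / from the reversed right; rsplit = cut at the LAST '.'),
-- exact for these single-character arguments.
def extractPackage (class_name : String) : String :=
  let norm := ((PySem.Str.replace class_name "/" ".").toList.dropWhile (· == 'L')).reverse.dropWhile (· == ';')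
  -- norm is the normalized string REVERSED; rsplit(".",1)[0] = chars before the last '.'
  if norm.contains '.' then String.ofList ((norm.dropWhile (· ≠ '.')).drop 1).reverse else ""

-- ===== PORT A =====
def cross_reference_classes (class_lists : List (String × List String)) : List (String × List String) :=
  let pkg_to_dex : PySem.Dict String (PySem.Set String) :=
    class_lists.foldl (fun d p =>
      p.2.foldl (fun d cls =>
        let pkg := extractPackage cls
        if pkg ≠ "" then d.modify pkg PySem.Set.empty (fun s => s.add p.1) else d) d)
      PySem.Dict.empty
  pkg_to_dex.items.map (fun q => (q.1, PySem.List.sorted q.2 (fun x => x) false))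

-- ===== PORT B =====
def cross_reference_classes_alt (class_lists : List (String × List String)) : List (String × List String) :=
  let pairs : List (String × String) :=
    class_lists.flatMap (fun p => p.2.filterMap (fun cls =>
      let pkg := extractPackage cls
      if pkg ≠ "" then some (pkg, p.1) else none))
  (PySem.List.dedup (pairs.map (·.1))).map (fun pkg =>
    (pkg, PySem.List.sorted (PySem.Set.ofList ((pairs.filter (fun q => q.1 == pkg)).map (·.2))) (fun x => x) false))

-- ===== PRECONDITION & SPEC =====
def Spec_cross_reference_classes (class_lists : List (String × List String)) (out : List (String × List String)) : Prop := out = cross_reference_classes_alt class_lists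
instance (class_lists : List (String × List String)) (out : List (String × List String)) : Decidable (Spec_cross_reference_classes class_lists out) := by unfold Spec_cross_reference_classes; infer_instance

-- ===== CLAIM (what is proved, stated in full; the proofs are below) =====
def Claim_equal_cross_reference_classes : Prop := ∀ (class_lists : List (String × List String)), Dom_cross_reference_classes class_lists → Spec_cross_reference_classes class_lists (cross_reference_classes class_lists)

-- ===== LEMMAS AND PROOFS =====

-- the per-pair accumulation step of A's dict
def pvStep (d : PySem.Dict String (PySem.Set String)) (q : String × String) : PySem.Dict String (PySem.Set String) :=
  d.modify q.1 PySem.Set.empty (fun s => s.add q.2)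

-- the flattened pair list (B's `pairs`)
def pvPairs (class_lists : List (String × List String)) : List (String × String) :=
  class_lists.flatMap (fun p => p.2.filterMap (fun cls =>
    let pkg := extractPackage cls
    if pkg ≠ "" then some (pkg, p.1) else none))

lemma inner_fold_eq (dex : String) (classes : List String) (d : PySem.Dict String (PySem.Set String)) :
    classes.foldl (fun d cls =>
        let pkg := extractPackage cls
        if pkg ≠ "" then d.modify pkg PySem.Set.empty (fun s => s.add dex) else d) d
      = (classes.filterMap (fun cls =>
          let pkg := extractPackage cls
          if pkg ≠ "" then some (pkg, dex) else none)).foldl pvStep d := by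
  induction classes generalizing d with
  | nil => rfl
  | cons c cs ih =>
      by_cases h : extractPackage c = ""
      · simpa [List.foldl_cons, List.filterMap_cons, h] using ih d
      · simpa [List.foldl_cons, List.filterMap_cons, h, pvStep] using
          ih (d.modify (extractPackage c) PySem.Set.empty (fun s => s.add dex))

lemma dict_eq_pairs_fold (class_lists : List (String × List String)) :
    class_lists.foldl (fun d p =>
        p.2.foldl (fun d cls =>
          let pkg := extractPackage cls
          if pkg ≠ "" then d.modify pkg PySem.Set.empty (fun s => s.add p.1) else d) d)
      PySem.Dict.empty
    = (pvPairs class_lists).foldl pvStep PySem.Dict.empty := by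
  rw [pvPairs, List.foldl_flatMap]
  exact PySem.List.foldl_congr_mem _ _ _ _ (fun d p _ => inner_fold_eq p.1 p.2 d)

lemma getD_pairs_fold (ps : List (String × String)) (p : String)
    (d : PySem.Dict String (PySem.Set String)) :
    (ps.foldl pvStep d).getD p PySem.Set.empty
      = ((ps.filter (fun q => q.1 == p)).map (·.2)).foldl PySem.Set.add (d.getD p PySem.Set.empty) := by
  induction ps generalizing d with
  | nil => rfl
  | cons q qs ih =>
      simp only [List.foldl_cons, List.filter_cons]
      rw [ih]
      by_cases h : q.1 = p
      · subst h
        simp [pvStep, PySem.Dict.getD_modify_self]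
      · have : (q.1 == p) = false := by simp [h]
        rw [this]
        simp only [Bool.false_eq_true, if_false]
        rw [pvStep, PySem.Dict.getD_modify_of_ne]
        exact fun hc => h hc.symm

lemma pvStep_eq : pvStep = fun d (q : String × String) => d.modify q.1 PySem.Set.empty (fun s => PySem.Set.add s q.2) := rfl

lemma keys_pairs_fold (ps : List (String × String)) :
    (ps.foldl pvStep PySem.Dict.empty).keys = PySem.List.dedup (ps.map (·.1)) := by
  have h := PySem.Dict.keys_foldl_modify_key ps (fun q : String × String => q.1)
      PySem.Set.empty (fun _ q => (fun s => PySem.Set.add s q.2)) PySem.Dict.empty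
  rw [pvStep_eq]
  rw [show (fun d (q : String × String) => PySem.Dict.modify d q.1 PySem.Set.empty (fun s => PySem.Set.add s q.2))
        = (fun d (q : String × String) => PySem.Dict.modify d ((fun q : String × String => q.1) q) PySem.Set.empty
            ((fun _ q => (fun s => PySem.Set.add s q.2)) d q)) from rfl]
  rw [h]
  simp [PySem.Set.update_nil_left, PySem.List.dedup_eq_ofList]

lemma nodup_keys_pairs_fold (ps : List (String × String)) :
    (ps.foldl pvStep PySem.Dict.empty).keys.Nodup := by
  rw [pvStep_eq]
  exact PySem.Dict.nodup_keys_foldl_modify_key ps (fun q : String × String => q.1)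
    PySem.Set.empty (fun _ q => (fun s => PySem.Set.add s q.2)) PySem.Dict.empty
    (by simp [PySem.Dict.keys_empty])

-- ===== VERDICT (by name: the statement is the Claim_ definition above) =====
theorem cross_reference_classes_spec : Claim_equal_cross_reference_classes := by
  intro cl _
  show cross_reference_classes cl = cross_reference_classes_alt cl
  have hA : cross_reference_classes cl
      = ((pvPairs cl).foldl pvStep PySem.Dict.empty).items.map
          (fun q => (q.1, PySem.List.sorted q.2 (fun x => x) false)) :=
    congrArg (fun d : PySem.Dict String (PySem.Set String) =>
      d.items.map (fun q : String × PySem.Set String =>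
        (q.1, PySem.List.sorted q.2 (fun x => x) false)))
      (dict_eq_pairs_fold cl)
  rw [hA]
  show _ = (PySem.List.dedup ((pvPairs cl).map (·.1))).map (fun pkg =>
          (pkg, PySem.List.sorted
            (PySem.Set.ofList (((pvPairs cl).filter (fun q => q.1 == pkg)).map (·.2)))
            (fun x => x) false))
  set ps := pvPairs cl with hps
  rw [PySem.Dict.items_eq_map_keys _ (nodup_keys_pairs_fold ps) PySem.Set.empty]
  rw [List.map_map, keys_pairs_fold]
  refine List.map_congr_left (fun k _ => ?_)
  simp only [Function.comp]
  rw [getD_pairs_fold]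
  simp [PySem.Set.ofList_eq_foldl, PySem.Dict.getD_empty]
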